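-- pv_equiv track=rewrite | github.com/atlasunified/atlas-math | atlas_math/modules/prealgebra/_common.py | expression_words
-- ===== SOURCE A (Python) =====
-- def expression_words(text: str) -> str:
--     out = str(text)
--     replacements = [
--         ("<=", " less than or equal to "),
--         (">=", " greater than or equal to "),
--         ("!=", " not equal to "),
--         ("^", " to the power of "),
--         ("+", " plus "),
--         ("-", " minus "),
--         ("=", " equals "),
--         ("(", " open parenthesis "),
--         (")", " close parenthesis "),
--         ("/", " over "),
--         (",", " comma "),
--     ]
--     for a, b in replacements:
--         out = out.replace(a, b)
--     return " ".join(out.split()).lower()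
-- ===== SOURCE B (Python) =====
-- def expression_words(text: str) -> str:
--     two = {
--         "<=": " less than or equal to ",
--         ">=": " greater than or equal to ",
--         "!=": " not equal to ",
--     }
--     one = {
--         "^": " to the power of ",
--         "+": " plus ",
--         "-": " minus ",
--         "=": " equals ",
--         "(": " open parenthesis ",
--         ")": " close parenthesis ",
--         "/": " over ",
--         ",": " comma ",
--     }
--     parts = []
--     i = 0
--     n = len(text)
--     while i < n:
--         pair = text[i:i + 2]
--         if pair in two:
--             parts.append(two[pair])
--             i += 2
--         else:
--             parts.append(one.get(text[i], text[i]))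
--             i += 1
--     return " ".join("".join(parts).split()).lower()
-- ===== Notes on version B (the rewrite author's own statement) =====
-- stated objective: alternative
-- what changed: A runs eleven sequential full-string .replace passes; B does a single left-to-right scan that at each position tries the two-char operator table (text[i:i+2]) first, then the one-char table, emitting words as it goes, followed by the same whitespace-collapse/lowercase normalization.
import Mathlib
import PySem

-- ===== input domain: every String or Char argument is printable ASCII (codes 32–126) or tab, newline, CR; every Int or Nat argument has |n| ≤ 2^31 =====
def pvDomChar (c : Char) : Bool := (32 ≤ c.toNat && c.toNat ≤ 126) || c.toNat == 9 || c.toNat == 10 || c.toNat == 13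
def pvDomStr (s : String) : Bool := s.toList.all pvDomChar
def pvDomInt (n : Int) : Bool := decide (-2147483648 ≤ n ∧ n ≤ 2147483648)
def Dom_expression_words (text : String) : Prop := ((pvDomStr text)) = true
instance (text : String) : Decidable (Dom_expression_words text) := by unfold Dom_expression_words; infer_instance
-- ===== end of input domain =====

-- B replaces A's eleven sequential full-string .replace passes by one left-to-right scan
-- that emits the word for a two-char operator, a one-char operator, or the raw character
-- (objective: alternative single-pass structure; same normalization at the end).


-- ===== PORT A =====
-- literal transliteration of A: out = str(text); eleven .replace passes in order;
-- then " ".join(out.split()).lower()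
def expression_words (text : String) : String :=
  let out := text
  let out := PySem.Str.replace out "<=" " less than or equal to "
  let out := PySem.Str.replace out ">=" " greater than or equal to "
  let out := PySem.Str.replace out "!=" " not equal to "
  let out := PySem.Str.replace out "^" " to the power of "
  let out := PySem.Str.replace out "+" " plus "
  let out := PySem.Str.replace out "-" " minus "
  let out := PySem.Str.replace out "=" " equals "
  let out := PySem.Str.replace out "(" " open parenthesis "
  let out := PySem.Str.replace out ")" " close parenthesis "
  let out := PySem.Str.replace out "/" " over "
  let out := PySem.Str.replace out "," " comma "
  PySem.Str.lower (PySem.Str.join " " (PySem.Str.split₀ out))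

-- ===== PORT B =====
-- Source B's two-char operator table lookup on text[i:i+2] (first char, next char)
def ewTwoHead (c : Char) (d? : Option Char) : Option (List Char) :=
  if c = '<' ∧ d? = some '=' then some (" less than or equal to ").toList
  else if c = '>' ∧ d? = some '=' then some (" greater than or equal to ").toList
  else if c = '!' ∧ d? = some '=' then some (" not equal to ").toList
  else none

-- Source B's one-char table with default: one.get(text[i], text[i])
def ewOne (c : Char) : List Char :=
  if c = '^' then (" to the power of ").toList
  else if c = '+' then (" plus ").toList
  else if c = '-' then (" minus ").toList
  else if c = '=' then (" equals ").toList
  else if c = '(' then (" open parenthesis ").toList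
  else if c = ')' then (" close parenthesis ").toList
  else if c = '/' then (" over ").toList
  else if c = ',' then (" comma ").toList
  else [c]

-- Source B's while loop: advance by 2 on a two-char operator, else by 1
def ewScan : List Char → List Char
  | [] => []
  | c :: t =>
    match ewTwoHead c t.head? with
    | some w => w ++ ewScan (t.drop 1)
    | none => ewOne c ++ ewScan t
termination_by l => l.length
decreasing_by all_goals simp

def expression_words_alt (text : String) : String :=
  PySem.Str.lower (PySem.Str.join " " (PySem.Str.split₀ (String.ofList (ewScan text.toList))))

-- ===== PRECONDITION & SPEC =====
def Spec_expression_words (text : String) (out : String) : Prop := out = expression_words_alt text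
instance (text : String) (out : String) : Decidable (Spec_expression_words text out) := by unfold Spec_expression_words; infer_instance

-- ===== CLAIM (what is proved, stated in full; the proofs are below) =====
def Claim_equal_expression_words : Prop := ∀ (text : String), Dom_expression_words text → Spec_expression_words text (expression_words text)

-- ===== LEMMAS AND PROOFS =====

-- structural-recursion reading of Python's str.replace (proof helper)
def rep (p w : List Char) : List Char → List Char
  | [] => []
  | c :: t =>
    if p.isPrefixOf (c :: t) then w ++ rep p w (t.drop (p.length - 1))
    else c :: rep p w t
termination_by l => l.length
decreasing_by all_goals simp

theorem rep_eq_go (p w : List Char) (hp : p ≠ []) :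
    ∀ (fuel : Nat) (l acc : List Char), l.length ≤ fuel →
      PySem.Chars.replace.go p w fuel l acc = acc.reverse ++ rep p w l := by
  intro fuel
  induction fuel with
  | zero =>
    intro l acc h
    have : l = [] := List.eq_nil_of_length_eq_zero (Nat.le_zero.mp h)
    subst this
    rw [PySem.Chars.replace.go, rep]
  | succ n ih =>
    intro l acc h
    cases l with
    | nil =>
      rw [PySem.Chars.replace.go, rep]
      simp
      omega
    | cons c t =>
      obtain ⟨p0, p2, rfl⟩ : ∃ p0 p2, p = p0 :: p2 := by
        cases p with
        | nil => exact absurd rfl hp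
        | cons a b => exact ⟨a, b, rfl⟩
      rw [PySem.Chars.replace.go, rep]
      by_cases hpre : (p0 :: p2).isPrefixOf (c :: t)
      · simp only [hpre, if_true, List.length_cons, Nat.add_sub_cancel, List.drop_succ_cons]
        rw [ih (t.drop p2.length) (w.reverse ++ acc) (by simp at h ⊢; omega)]
        simp
      · simp only [hpre]
        rw [ih t (c :: acc) (by simp at h; omega)]
        simp

theorem replace_eq_rep (l p w : List Char) (hp : p ≠ []) :
    PySem.Chars.replace l p w = rep p w l := by
  rw [PySem.Chars.replace]
  simp [List.isEmpty_eq_false_iff.mpr hp, rep_eq_go p w hp l.length l [] (le_refl _)]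

theorem rep_nil (p w : List Char) : rep p w [] = [] := by rw [rep]

theorem rep_cons_ne (p0 : Char) (p2 w : List Char) (c : Char) (t : List Char) (h : p0 ≠ c) :
    rep (p0 :: p2) w (c :: t) = c :: rep (p0 :: p2) w t := by
  rw [rep]
  simp [List.isPrefixOf_cons₂, h]

theorem rep_cons2_ne (p0 p1 : Char) (w : List Char) (c : Char) (t : List Char)
    (h : t.head? ≠ some p1) :
    rep [p0, p1] w (c :: t) = c :: rep [p0, p1] w t := by
  rw [rep]
  cases t with
  | nil => simp [List.isPrefixOf]
  | cons d t' =>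
    have hd : p1 ≠ d := by intro e; exact h (by simp [e])
    simp only [List.isPrefixOf_cons₂]
    split_ifs with hif
    · obtain ⟨-, h2⟩ := by simpa [List.isPrefixOf_cons₂] using hif
      exact absurd h2 hd
    · rfl

theorem rep_match1 (p0 : Char) (w t : List Char) :
    rep [p0] w (p0 :: t) = w ++ rep [p0] w t := by
  rw [rep]; simp [List.isPrefixOf]

theorem rep_match2 (p0 p1 : Char) (w t : List Char) :
    rep [p0, p1] w (p0 :: p1 :: t) = w ++ rep [p0, p1] w t := by
  rw [rep]; simp [List.isPrefixOf_cons₂, List.isPrefixOf]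

theorem rep_append (p0 : Char) (p2 w : List Char) (a x : List Char) (h : p0 ∉ a) :
    rep (p0 :: p2) w (a ++ x) = a ++ rep (p0 :: p2) w x := by
  induction a with
  | nil => simp
  | cons d a' ih =>
    have hd : p0 ≠ d := fun e => h (by simp [e])
    simp only [List.cons_append, rep_cons_ne p0 p2 w d _ hd, ih (fun hm => h (List.mem_cons_of_mem _ hm))]

theorem rep_head_eq (p0 : Char) (p2 w : List Char) (x : List Char)
    (hp : p0 ≠ '=') (hw : w.head? ≠ some '=') (hwne : w ≠ []) :
    ((rep (p0 :: p2) w x).head? = some '=') ↔ (x.head? = some '=') := by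
  cases x with
  | nil => rw [rep_nil]
  | cons c t =>
    rw [rep]
    by_cases hpre : (p0 :: p2).isPrefixOf (c :: t)
    · have hc : c = p0 := by
        rw [List.isPrefixOf_cons₂] at hpre
        exact ((beq_iff_eq.mp (Bool.and_elim_left hpre))).symm
      obtain ⟨d, w', rfl⟩ : ∃ d w', w = d :: w' := by
        cases w with
        | nil => exact absurd rfl hwne
        | cons d w' => exact ⟨d, w', rfl⟩
      have hd : d ≠ '=' := by intro e; exact hw (by simp [e])
      simp only [hpre, if_true, List.cons_append, List.head?_cons]
      constructor
      · intro e; exact absurd (Option.some_inj.mp e) hd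
      · intro e; exact absurd (hc ▸ Option.some_inj.mp e) hp
    · simp [hpre]

def wLE : List Char := (" less than or equal to ").toList
def wGE : List Char := (" greater than or equal to ").toList
def wNE : List Char := (" not equal to ").toList
def wPow : List Char := (" to the power of ").toList
def wPlus : List Char := (" plus ").toList
def wMinus : List Char := (" minus ").toList
def wEq : List Char := (" equals ").toList
def wOP : List Char := (" open parenthesis ").toList
def wCP : List Char := (" close parenthesis ").toList
def wOver : List Char := (" over ").toList
def wComma : List Char := (" comma ").toList

def chainRep (l : List Char) : List Char :=
  rep [','] wComma (rep ['/'] wOver (rep [')'] wCP (rep ['('] wOP (rep ['='] wEq (rep ['-'] wMinus (rep ['+'] wPlus (rep ['^'] wPow (rep ['!', '='] wNE (rep ['>', '='] wGE (rep ['<', '='] wLE (l)))))))))))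


theorem chain_eq_scan : ∀ (n : Nat) (l : List Char), l.length ≤ n → chainRep l = ewScan l := by
  intro n
  induction n with
  | zero =>
    intro l h
    have hl : l = [] := List.eq_nil_of_length_eq_zero (Nat.le_zero.mp h)
    subst hl
    unfold chainRep
    simp [rep_nil, ewScan]
  | succ n ih =>
    intro l h
    cases l with
    | nil => unfold chainRep; simp [rep_nil, ewScan]
    | cons c t =>
      have ht : t.length ≤ n := by simp at h; omega
      by_cases hc0 : c = '<'
      · subst hc0
        by_cases hd : t.head? = some '='
        · cases t with
          | nil => simp at hd
          | cons d t2 =>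
            have hde : d = '=' := by simpa using hd
            subst hde
            have ht2 : t2.length ≤ n := by simp at h; omega
            have e : chainRep ('<' :: '=' :: t2) = wLE ++ chainRep t2 := by
              unfold chainRep
              rw [rep_match2 '<' '=' wLE _,
                  rep_append '>' ['='] wGE wLE _ (by decide),
                  rep_append '!' ['='] wNE wLE _ (by decide),
                  rep_append '^' [] wPow wLE _ (by decide),
                  rep_append '+' [] wPlus wLE _ (by decide),
                  rep_append '-' [] wMinus wLE _ (by decide),
                  rep_append '=' [] wEq wLE _ (by decide),
                  rep_append '(' [] wOP wLE _ (by decide),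
                  rep_append ')' [] wCP wLE _ (by decide),
                  rep_append '/' [] wOver wLE _ (by decide),
                  rep_append ',' [] wComma wLE _ (by decide)]
            rw [e, ih t2 ht2]
            simp [ewScan, ewTwoHead, wLE]
        · have hd2 : ((t).head? = some '=') → False := hd
          have e : chainRep ('<' :: t) = '<' :: chainRep t := by
            unfold chainRep
            rw [rep_cons2_ne '<' '=' wLE '<' _ hd2,
                rep_cons_ne '>' ['='] wGE '<' _ (by decide),
                rep_cons_ne '!' ['='] wNE '<' _ (by decide),
                rep_cons_ne '^' [] wPow '<' _ (by decide),
                rep_cons_ne '+' [] wPlus '<' _ (by decide),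
                rep_cons_ne '-' [] wMinus '<' _ (by decide),
                rep_cons_ne '=' [] wEq '<' _ (by decide),
                rep_cons_ne '(' [] wOP '<' _ (by decide),
                rep_cons_ne ')' [] wCP '<' _ (by decide),
                rep_cons_ne '/' [] wOver '<' _ (by decide),
                rep_cons_ne ',' [] wComma '<' _ (by decide)]
          rw [e, ih t ht]
          simp [ewScan, ewTwoHead, ewOne, hd]
      by_cases hc1 : c = '>'
      · subst hc1
        by_cases hd : t.head? = some '='
        · cases t with
          | nil => simp at hd
          | cons d t2 =>
            have hde : d = '=' := by simpa using hd
            subst hde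
            have ht2 : t2.length ≤ n := by simp at h; omega
            have e : chainRep ('>' :: '=' :: t2) = wGE ++ chainRep t2 := by
              unfold chainRep
              rw [rep_cons_ne '<' ['='] wLE '>' _ (by decide),
                  rep_cons_ne '<' ['='] wLE '=' _ (by decide),
                  rep_match2 '>' '=' wGE _,
                  rep_append '!' ['='] wNE wGE _ (by decide),
                  rep_append '^' [] wPow wGE _ (by decide),
                  rep_append '+' [] wPlus wGE _ (by decide),
                  rep_append '-' [] wMinus wGE _ (by decide),
                  rep_append '=' [] wEq wGE _ (by decide),
                  rep_append '(' [] wOP wGE _ (by decide),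
                  rep_append ')' [] wCP wGE _ (by decide),
                  rep_append '/' [] wOver wGE _ (by decide),
                  rep_append ',' [] wComma wGE _ (by decide)]
            rw [e, ih t2 ht2]
            simp [ewScan, ewTwoHead, wGE]
        · have hh0 : ((rep ['<', '='] wLE (t)).head? = some '=') ↔ ((t).head? = some '=') := rep_head_eq '<' ['='] wLE (t) (by decide) (by decide) (by decide)
          have hd2 : ((rep ['<', '='] wLE (t)).head? = some '=') → False := (fun e => hd (hh0.mp (e)))
          have e : chainRep ('>' :: t) = '>' :: chainRep t := by
            unfold chainRep
            rw [rep_cons_ne '<' ['='] wLE '>' _ (by decide),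
                rep_cons2_ne '>' '=' wGE '>' _ hd2,
                rep_cons_ne '!' ['='] wNE '>' _ (by decide),
                rep_cons_ne '^' [] wPow '>' _ (by decide),
                rep_cons_ne '+' [] wPlus '>' _ (by decide),
                rep_cons_ne '-' [] wMinus '>' _ (by decide),
                rep_cons_ne '=' [] wEq '>' _ (by decide),
                rep_cons_ne '(' [] wOP '>' _ (by decide),
                rep_cons_ne ')' [] wCP '>' _ (by decide),
                rep_cons_ne '/' [] wOver '>' _ (by decide),
                rep_cons_ne ',' [] wComma '>' _ (by decide)]
          rw [e, ih t ht]
          simp [ewScan, ewTwoHead, ewOne, hd]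
      by_cases hc2 : c = '!'
      · subst hc2
        by_cases hd : t.head? = some '='
        · cases t with
          | nil => simp at hd
          | cons d t2 =>
            have hde : d = '=' := by simpa using hd
            subst hde
            have ht2 : t2.length ≤ n := by simp at h; omega
            have e : chainRep ('!' :: '=' :: t2) = wNE ++ chainRep t2 := by
              unfold chainRep
              rw [rep_cons_ne '<' ['='] wLE '!' _ (by decide),
                  rep_cons_ne '<' ['='] wLE '=' _ (by decide),
                  rep_cons_ne '>' ['='] wGE '!' _ (by decide),
                  rep_cons_ne '>' ['='] wGE '=' _ (by decide),
                  rep_match2 '!' '=' wNE _,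
                  rep_append '^' [] wPow wNE _ (by decide),
                  rep_append '+' [] wPlus wNE _ (by decide),
                  rep_append '-' [] wMinus wNE _ (by decide),
                  rep_append '=' [] wEq wNE _ (by decide),
                  rep_append '(' [] wOP wNE _ (by decide),
                  rep_append ')' [] wCP wNE _ (by decide),
                  rep_append '/' [] wOver wNE _ (by decide),
                  rep_append ',' [] wComma wNE _ (by decide)]
            rw [e, ih t2 ht2]
            simp [ewScan, ewTwoHead, wNE]
        · have hh0 : ((rep ['<', '='] wLE (t)).head? = some '=') ↔ ((t).head? = some '=') := rep_head_eq '<' ['='] wLE (t) (by decide) (by decide) (by decide)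
          have hh1 : ((rep ['>', '='] wGE (rep ['<', '='] wLE (t))).head? = some '=') ↔ ((rep ['<', '='] wLE (t)).head? = some '=') := rep_head_eq '>' ['='] wGE (rep ['<', '='] wLE (t)) (by decide) (by decide) (by decide)
          have hd2 : ((rep ['>', '='] wGE (rep ['<', '='] wLE (t))).head? = some '=') → False := (fun e => hd (hh0.mp (hh1.mp (e))))
          have e : chainRep ('!' :: t) = '!' :: chainRep t := by
            unfold chainRep
            rw [rep_cons_ne '<' ['='] wLE '!' _ (by decide),
                rep_cons_ne '>' ['='] wGE '!' _ (by decide),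
                rep_cons2_ne '!' '=' wNE '!' _ hd2,
                rep_cons_ne '^' [] wPow '!' _ (by decide),
                rep_cons_ne '+' [] wPlus '!' _ (by decide),
                rep_cons_ne '-' [] wMinus '!' _ (by decide),
                rep_cons_ne '=' [] wEq '!' _ (by decide),
                rep_cons_ne '(' [] wOP '!' _ (by decide),
                rep_cons_ne ')' [] wCP '!' _ (by decide),
                rep_cons_ne '/' [] wOver '!' _ (by decide),
                rep_cons_ne ',' [] wComma '!' _ (by decide)]
          rw [e, ih t ht]
          simp [ewScan, ewTwoHead, ewOne, hd]
      by_cases hc3 : c = '^'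
      · subst hc3
        have e : chainRep ('^' :: t) = wPow ++ chainRep t := by
          unfold chainRep
          rw [rep_cons_ne '<' ['='] wLE '^' _ (by decide),
              rep_cons_ne '>' ['='] wGE '^' _ (by decide),
              rep_cons_ne '!' ['='] wNE '^' _ (by decide),
              rep_match1 '^' wPow _,
              rep_append '+' [] wPlus wPow _ (by decide),
              rep_append '-' [] wMinus wPow _ (by decide),
              rep_append '=' [] wEq wPow _ (by decide),
              rep_append '(' [] wOP wPow _ (by decide),
              rep_append ')' [] wCP wPow _ (by decide),
              rep_append '/' [] wOver wPow _ (by decide),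
              rep_append ',' [] wComma wPow _ (by decide)]
        rw [e, ih t ht]
        simp [ewScan, ewTwoHead, ewOne, wPow]
      by_cases hc4 : c = '+'
      · subst hc4
        have e : chainRep ('+' :: t) = wPlus ++ chainRep t := by
          unfold chainRep
          rw [rep_cons_ne '<' ['='] wLE '+' _ (by decide),
              rep_cons_ne '>' ['='] wGE '+' _ (by decide),
              rep_cons_ne '!' ['='] wNE '+' _ (by decide),
              rep_cons_ne '^' [] wPow '+' _ (by decide),
              rep_match1 '+' wPlus _,
              rep_append '-' [] wMinus wPlus _ (by decide),
              rep_append '=' [] wEq wPlus _ (by decide),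
              rep_append '(' [] wOP wPlus _ (by decide),
              rep_append ')' [] wCP wPlus _ (by decide),
              rep_append '/' [] wOver wPlus _ (by decide),
              rep_append ',' [] wComma wPlus _ (by decide)]
        rw [e, ih t ht]
        simp [ewScan, ewTwoHead, ewOne, wPlus]
      by_cases hc5 : c = '-'
      · subst hc5
        have e : chainRep ('-' :: t) = wMinus ++ chainRep t := by
          unfold chainRep
          rw [rep_cons_ne '<' ['='] wLE '-' _ (by decide),
              rep_cons_ne '>' ['='] wGE '-' _ (by decide),
              rep_cons_ne '!' ['='] wNE '-' _ (by decide),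
              rep_cons_ne '^' [] wPow '-' _ (by decide),
              rep_cons_ne '+' [] wPlus '-' _ (by decide),
              rep_match1 '-' wMinus _,
              rep_append '=' [] wEq wMinus _ (by decide),
              rep_append '(' [] wOP wMinus _ (by decide),
              rep_append ')' [] wCP wMinus _ (by decide),
              rep_append '/' [] wOver wMinus _ (by decide),
              rep_append ',' [] wComma wMinus _ (by decide)]
        rw [e, ih t ht]
        simp [ewScan, ewTwoHead, ewOne, wMinus]
      by_cases hc6 : c = '='
      · subst hc6
        have e : chainRep ('=' :: t) = wEq ++ chainRep t := by
          unfold chainRep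
          rw [rep_cons_ne '<' ['='] wLE '=' _ (by decide),
              rep_cons_ne '>' ['='] wGE '=' _ (by decide),
              rep_cons_ne '!' ['='] wNE '=' _ (by decide),
              rep_cons_ne '^' [] wPow '=' _ (by decide),
              rep_cons_ne '+' [] wPlus '=' _ (by decide),
              rep_cons_ne '-' [] wMinus '=' _ (by decide),
              rep_match1 '=' wEq _,
              rep_append '(' [] wOP wEq _ (by decide),
              rep_append ')' [] wCP wEq _ (by decide),
              rep_append '/' [] wOver wEq _ (by decide),
              rep_append ',' [] wComma wEq _ (by decide)]
        rw [e, ih t ht]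
        simp [ewScan, ewTwoHead, ewOne, wEq]
      by_cases hc7 : c = '('
      · subst hc7
        have e : chainRep ('(' :: t) = wOP ++ chainRep t := by
          unfold chainRep
          rw [rep_cons_ne '<' ['='] wLE '(' _ (by decide),
              rep_cons_ne '>' ['='] wGE '(' _ (by decide),
              rep_cons_ne '!' ['='] wNE '(' _ (by decide),
              rep_cons_ne '^' [] wPow '(' _ (by decide),
              rep_cons_ne '+' [] wPlus '(' _ (by decide),
              rep_cons_ne '-' [] wMinus '(' _ (by decide),
              rep_cons_ne '=' [] wEq '(' _ (by decide),
              rep_match1 '(' wOP _,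
              rep_append ')' [] wCP wOP _ (by decide),
              rep_append '/' [] wOver wOP _ (by decide),
              rep_append ',' [] wComma wOP _ (by decide)]
        rw [e, ih t ht]
        simp [ewScan, ewTwoHead, ewOne, wOP]
      by_cases hc8 : c = ')'
      · subst hc8
        have e : chainRep (')' :: t) = wCP ++ chainRep t := by
          unfold chainRep
          rw [rep_cons_ne '<' ['='] wLE ')' _ (by decide),
              rep_cons_ne '>' ['='] wGE ')' _ (by decide),
              rep_cons_ne '!' ['='] wNE ')' _ (by decide),
              rep_cons_ne '^' [] wPow ')' _ (by decide),
              rep_cons_ne '+' [] wPlus ')' _ (by decide),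
              rep_cons_ne '-' [] wMinus ')' _ (by decide),
              rep_cons_ne '=' [] wEq ')' _ (by decide),
              rep_cons_ne '(' [] wOP ')' _ (by decide),
              rep_match1 ')' wCP _,
              rep_append '/' [] wOver wCP _ (by decide),
              rep_append ',' [] wComma wCP _ (by decide)]
        rw [e, ih t ht]
        simp [ewScan, ewTwoHead, ewOne, wCP]
      by_cases hc9 : c = '/'
      · subst hc9
        have e : chainRep ('/' :: t) = wOver ++ chainRep t := by
          unfold chainRep
          rw [rep_cons_ne '<' ['='] wLE '/' _ (by decide),
              rep_cons_ne '>' ['='] wGE '/' _ (by decide),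
              rep_cons_ne '!' ['='] wNE '/' _ (by decide),
              rep_cons_ne '^' [] wPow '/' _ (by decide),
              rep_cons_ne '+' [] wPlus '/' _ (by decide),
              rep_cons_ne '-' [] wMinus '/' _ (by decide),
              rep_cons_ne '=' [] wEq '/' _ (by decide),
              rep_cons_ne '(' [] wOP '/' _ (by decide),
              rep_cons_ne ')' [] wCP '/' _ (by decide),
              rep_match1 '/' wOver _,
              rep_append ',' [] wComma wOver _ (by decide)]
        rw [e, ih t ht]
        simp [ewScan, ewTwoHead, ewOne, wOver]
      by_cases hc10 : c = ','
      · subst hc10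
        have e : chainRep (',' :: t) = wComma ++ chainRep t := by
          unfold chainRep
          rw [rep_cons_ne '<' ['='] wLE ',' _ (by decide),
              rep_cons_ne '>' ['='] wGE ',' _ (by decide),
              rep_cons_ne '!' ['='] wNE ',' _ (by decide),
              rep_cons_ne '^' [] wPow ',' _ (by decide),
              rep_cons_ne '+' [] wPlus ',' _ (by decide),
              rep_cons_ne '-' [] wMinus ',' _ (by decide),
              rep_cons_ne '=' [] wEq ',' _ (by decide),
              rep_cons_ne '(' [] wOP ',' _ (by decide),
              rep_cons_ne ')' [] wCP ',' _ (by decide),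
              rep_cons_ne '/' [] wOver ',' _ (by decide),
              rep_match1 ',' wComma _]
        rw [e, ih t ht]
        simp [ewScan, ewTwoHead, ewOne, wComma]
      -- default: c is no operator head
      have e : chainRep (c :: t) = c :: chainRep t := by
        unfold chainRep
        rw [rep_cons_ne '<' ['='] wLE c _ (fun e => hc0 e.symm),
            rep_cons_ne '>' ['='] wGE c _ (fun e => hc1 e.symm),
            rep_cons_ne '!' ['='] wNE c _ (fun e => hc2 e.symm),
            rep_cons_ne '^' [] wPow c _ (fun e => hc3 e.symm),
            rep_cons_ne '+' [] wPlus c _ (fun e => hc4 e.symm),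
            rep_cons_ne '-' [] wMinus c _ (fun e => hc5 e.symm),
            rep_cons_ne '=' [] wEq c _ (fun e => hc6 e.symm),
            rep_cons_ne '(' [] wOP c _ (fun e => hc7 e.symm),
            rep_cons_ne ')' [] wCP c _ (fun e => hc8 e.symm),
            rep_cons_ne '/' [] wOver c _ (fun e => hc9 e.symm),
            rep_cons_ne ',' [] wComma c _ (fun e => hc10 e.symm)]
      rw [e, ih t ht]
      simp [ewScan, ewTwoHead, ewOne, hc0, hc1, hc2, hc3, hc4, hc5, hc6, hc7, hc8, hc9, hc10]

theorem chain_toList (text : String) :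
    (PySem.Str.replace (PySem.Str.replace (PySem.Str.replace (PySem.Str.replace (PySem.Str.replace (PySem.Str.replace (PySem.Str.replace (PySem.Str.replace (PySem.Str.replace (PySem.Str.replace (PySem.Str.replace text "<=" " less than or equal to ") ">=" " greater than or equal to ") "!=" " not equal to ") "^" " to the power of ") "+" " plus ") "-" " minus ") "=" " equals ") "(" " open parenthesis ") ")" " close parenthesis ") "/" " over ") "," " comma ").toList
      = ewScan text.toList := by
  simp only [PySem.Str.toList_replace]
  rw [replace_eq_rep _ ("<=").toList (" less than or equal to ").toList (by decide),
      replace_eq_rep _ (">=").toList (" greater than or equal to ").toList (by decide),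
      replace_eq_rep _ ("!=").toList (" not equal to ").toList (by decide),
      replace_eq_rep _ ("^").toList (" to the power of ").toList (by decide),
      replace_eq_rep _ ("+").toList (" plus ").toList (by decide),
      replace_eq_rep _ ("-").toList (" minus ").toList (by decide),
      replace_eq_rep _ ("=").toList (" equals ").toList (by decide),
      replace_eq_rep _ ("(").toList (" open parenthesis ").toList (by decide),
      replace_eq_rep _ (")").toList (" close parenthesis ").toList (by decide),
      replace_eq_rep _ ("/").toList (" over ").toList (by decide),
      replace_eq_rep _ (",").toList (" comma ").toList (by decide)]
  have : chainRep text.toList = ewScan text.toList :=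
    chain_eq_scan text.toList.length text.toList (le_refl _)
  exact this

-- ===== VERDICT (by name: the statement is the Claim_ definition above) =====
theorem expression_words_spec : Claim_equal_expression_words := by
  intro text _
  unfold Spec_expression_words expression_words expression_words_alt
  dsimp only
  have hs := chain_toList text
  have : (PySem.Str.replace (PySem.Str.replace (PySem.Str.replace (PySem.Str.replace (PySem.Str.replace (PySem.Str.replace (PySem.Str.replace (PySem.Str.replace (PySem.Str.replace (PySem.Str.replace (PySem.Str.replace text "<=" " less than or equal to ") ">=" " greater than or equal to ") "!=" " not equal to ") "^" " to the power of ") "+" " plus ") "-" " minus ") "=" " equals ") "(" " open parenthesis ") ")" " close parenthesis ") "/" " over ") "," " comma ")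
      = String.ofList (ewScan text.toList) :=
    String.toList_inj.mp (by rw [hs, String.toList_ofList])
  rw [this]
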